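-- pv_equiv track=rewrite | github.com/jrycw/aoc2023-python | day14/python/main02.py | one_move
-- ===== SOURCE A (Python) =====
-- from copy import deepcopy
--
-- def one_move(grid):
--     iter_grid = deepcopy(grid)
--     for line_idx, line in enumerate(iter_grid):
--         if line_idx == 0:
--             continue
--         for e_idx, elem in enumerate(line):
--             hole = grid[line_idx - 1][e_idx]
--             if elem == "O" and hole == ".":
--                 grid[line_idx - 1][e_idx] = "O"
--                 grid[line_idx][e_idx] = "."
--     return grid
-- ===== SOURCE B (Python) =====
-- # Pure re-implementation: per-cell local rule (a rock shifts up iff its vertical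
-- # run of 'O's has a '.' above the top); builds a NEW grid, does not mutate the input
-- # (the original mutates in place; equivalence is about the return value only).
--
-- def _moved(grid, r, c):
--     # True iff the rock at (r, c) moves up one cell: walking up through the
--     # contiguous run of "O"s containing (r, c), the cell above the run is ".".
--     while r >= 1 and grid[r][c] == "O":
--         if grid[r - 1][c] == ".":
--             return True
--         r -= 1
--     return False
--
-- def one_move(grid):
--     out = []
--     for r, row in enumerate(grid):
--         new_row = []
--         for c, elem in enumerate(row):
--             if r + 1 < len(grid) and c < len(grid[r + 1]) and _moved(grid, r + 1, c):
--                 new_row.append("O")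
--             elif elem == "O" and _moved(grid, r, c):
--                 new_row.append(".")
--             else:
--                 new_row.append(elem)
--         out.append(new_row)
--     return out
-- ===== Notes on version B (the rewrite author's own statement) =====
-- stated objective: alternative
-- what changed: Replaces the mutate-in-place snapshot-and-cascade sweep with a pure per-cell rule: a cell becomes 'O' if the run of rocks below it shifts up, '.' if its own run shifts, else unchanged, where a vertical run of 'O's shifts iff the cell above its top is '.'; B builds a new grid and does not mutate the input (return value equivalence).
import Mathlib
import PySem

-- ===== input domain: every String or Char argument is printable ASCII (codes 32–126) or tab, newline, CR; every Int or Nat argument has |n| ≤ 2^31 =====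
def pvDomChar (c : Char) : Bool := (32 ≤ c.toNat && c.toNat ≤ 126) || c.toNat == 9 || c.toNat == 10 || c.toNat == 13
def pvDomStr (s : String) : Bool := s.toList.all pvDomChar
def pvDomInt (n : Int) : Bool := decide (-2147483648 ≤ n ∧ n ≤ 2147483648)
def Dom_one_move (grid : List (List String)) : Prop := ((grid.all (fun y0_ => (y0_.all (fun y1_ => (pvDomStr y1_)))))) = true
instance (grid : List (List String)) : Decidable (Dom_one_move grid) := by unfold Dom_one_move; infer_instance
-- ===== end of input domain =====

-- B replaces A's in-place snapshot-and-cascade sweep by a pure per-cell rule (a vertical run of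
-- rocks shifts up iff the cell above its top is '.'); A mutates its argument and returns it while
-- B builds a new grid — the equivalence proved here is about the RETURN value only.

-- ===== PORT A =====
-- grid[line_idx-1][e_idx] read / the two writes; Pre_ keeps every index in range (A raises IndexError otherwise)
def pvInnerStep (li : Int) (g : List (List String)) (q : Int × String) : List (List String) :=
  let hole := PySem.List.pyGetD (PySem.List.pyGetD g (li - 1) []) q.1 ""
  if q.2 == "O" && hole == "." then
    let g1 := PySem.List.pySetD g (li - 1)
      (PySem.List.pySetD (PySem.List.pyGetD g (li - 1) []) q.1 "O")
    PySem.List.pySetD g1 li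
      (PySem.List.pySetD (PySem.List.pyGetD g1 li []) q.1 ".")
  else g

def pvOuterStep (g : List (List String)) (p : Int × List String) : List (List String) :=
  if p.1 == 0 then g
  else (PySem.List.enumerate p.2 0).foldl (pvInnerStep p.1) g

def one_move (grid : List (List String)) : List (List String) :=
  let iter_grid := grid
  (PySem.List.enumerate iter_grid 0).foldl pvOuterStep grid

-- ===== PORT B =====
-- _moved(grid, r, c) of Source B: while-loop walking the run upwards, as recursion on r
def pvMovedUp (grid : List (List String)) (c : Nat) : Nat → Bool
  | 0 => false
  | r+1 =>
    if (grid.getD (r+1) []).getD c "" == "O" then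
      if (grid.getD r []).getD c "" == "." then true
      else pvMovedUp grid c r
    else false

def one_move_alt (grid : List (List String)) : List (List String) :=
  grid.mapIdx (fun r row =>
    row.mapIdx (fun c elem =>
      if r + 1 < grid.length ∧ c < (grid.getD (r+1) []).length ∧ pvMovedUp grid c (r+1) = true
      then "O"
      else if elem == "O" && pvMovedUp grid c r then "."
      else elem))

-- ===== PRECONDITION & SPEC =====
-- Pre_ excludes exactly the grids on which A raises IndexError: a row strictly longer than the
-- row above it makes A read grid[line_idx-1][e_idx] out of range.
def Pre_one_move (grid : List (List String)) : Prop :=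
  List.IsChain (fun a b => b.length ≤ a.length) grid
instance (grid : List (List String)) : Decidable (Pre_one_move grid) := by unfold Pre_one_move; infer_instance

def pvWitness_one_move : List (List String) := [[".", "#"], ["O", "O"], ["O"]]

def Spec_one_move (grid : List (List String)) (out : List (List String)) : Prop := out = one_move_alt grid
instance (grid : List (List String)) (out : List (List String)) : Decidable (Spec_one_move grid out) := by unfold Spec_one_move; infer_instance

-- ===== CLAIM (what is proved, stated in full; the proofs are below) =====
def Claim_equal_one_move : Prop := ∀ (grid : List (List String)), Dom_one_move grid → Pre_one_move grid → Spec_one_move grid (one_move grid)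

-- ===== LEMMAS AND PROOFS =====

-- entry (i, j) of a grid state, with Python's defaults never reached inside Pre_
def pvLk (g : List (List String)) (i j : Nat) : String := (g.getD i []).getD j ""

-- the common value of cell (i, j) after the first k rows have been processed
def pvVv (grid : List (List String)) (k i j : Nat) : String :=
  if pvMovedUp grid j (i+1) = true ∧ i+1 < k then "O"
  else if pvMovedUp grid j i = true ∧ i < k then "."
  else pvLk grid i j

-- A's loop invariant: shape preserved, every cell has its k-step value
def pvInv (grid g : List (List String)) (k : Nat) : Prop :=
  g.length = grid.length ∧
  (∀ i, (g.getD i []).length = (grid.getD i []).length) ∧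
  (∀ i j, pvLk g i j = pvVv grid k i j)

lemma pv_getD_oob {α : Type} (l : List α) (n : Nat) (d : α) (h : l.length ≤ n) : l.getD n d = d := by
  simp [List.getD_eq_getElem?_getD, List.getElem?_eq_none h]

lemma pv_getD_set {α : Type} (l : List α) (b i : Nat) (v d : α) :
    (l.set b v).getD i d = if i = b ∧ b < l.length then v else l.getD i d := by
  simp only [List.getD_eq_getElem?_getD, List.getElem?_set]
  split_ifs with h1 h2 h3 <;> simp_all

lemma pv_movedUp_oob (grid : List (List String)) (i j : Nat)
    (h : (grid.getD i []).length ≤ j) : pvMovedUp grid j i = false := by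
  cases i with
  | zero => rfl
  | succ r =>
    unfold pvMovedUp
    rw [pv_getD_oob _ _ _ h]
    simp

lemma pv_movedUp_isO (grid : List (List String)) (r j : Nat)
    (h : pvMovedUp grid j (r+1) = true) : (grid.getD (r+1) []).getD j "" = "O" := by
  unfold pvMovedUp at h
  split at h
  · next h1 => exact beq_iff_eq.mp h1
  · exact absurd h (by simp)

lemma pv_movedUp_lt (grid : List (List String)) (i j : Nat)
    (h : pvMovedUp grid j i = true) : j < (grid.getD i []).length := by
  by_contra hc
  rw [pv_movedUp_oob grid i j (by omega)] at h
  exact absurd h (by simp)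

lemma pv_pre_mono (grid : List (List String)) (hpre : Pre_one_move grid) (r : Nat) :
    (grid.getD (r+1) []).length ≤ (grid.getD r []).length := by
  by_cases h : r + 1 < grid.length
  · rw [List.getD_eq_getElem _ _ h, List.getD_eq_getElem _ _ (show r < grid.length by omega)]
    exact (List.isChain_iff_getElem.mp hpre) r h
  · rw [pv_getD_oob _ _ _ (by omega)]
    exact Nat.zero_le _

lemma pv_Lk_set2 (g : List (List String)) (a b : Nat) (v : String) (i j : Nat) :
    pvLk (g.set a ((g.getD a []).set b v)) i j =
      if i = a ∧ j = b ∧ a < g.length ∧ b < (g.getD a []).length then v else pvLk g i j := by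
  unfold pvLk
  rw [pv_getD_set]
  by_cases hia : i = a ∧ a < g.length
  · rw [if_pos hia, pv_getD_set]
    obtain ⟨h1, h2⟩ := hia
    subst h1
    split_ifs <;> simp_all [List.getD_eq_getElem?_getD, List.getElem?_eq_getElem h2] <;> omega
  · rw [if_neg hia]
    rw [if_neg (by tauto)]

lemma pv_movedUp_succ (grid : List (List String)) (r j : Nat) :
    pvMovedUp grid j (r+1) =
      (((grid.getD (r+1) []).getD j "" == "O") &&
       (((grid.getD r []).getD j "" == ".") || pvMovedUp grid j r)) := by
  conv_lhs => unfold pvMovedUp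
  split_ifs with h1 h2 <;> simp_all

lemma pv_two_sets (g : List (List String)) (k m : Nat) (hk1 : 1 ≤ k)
    (hklt : k < g.length) (hmr1 : m < (g.getD (k-1) []).length) (hmrk : m < (g.getD k []).length) :
    ((g.set (k-1) ((g.getD (k-1) []).set m "O")).set k
        (((g.set (k-1) ((g.getD (k-1) []).set m "O")).getD k []).set m ".")).length = g.length ∧
    (∀ i, (((g.set (k-1) ((g.getD (k-1) []).set m "O")).set k
        (((g.set (k-1) ((g.getD (k-1) []).set m "O")).getD k []).set m ".")).getD i []).length
      = (g.getD i []).length) ∧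
    (∀ i j, pvLk ((g.set (k-1) ((g.getD (k-1) []).set m "O")).set k
        (((g.set (k-1) ((g.getD (k-1) []).set m "O")).getD k []).set m ".")) i j =
      if i = k-1 ∧ j = m then "O" else if i = k ∧ j = m then "." else pvLk g i j) := by
  have hg1k : (g.set (k-1) ((g.getD (k-1) []).set m "O")).getD k [] = g.getD k [] := by
    rw [pv_getD_set, if_neg (by omega)]
  have hg1len : (g.set (k-1) ((g.getD (k-1) []).set m "O")).length = g.length := by simp
  refine ⟨by simp, ?_, ?_⟩
  · intro i
    rw [pv_getD_set]
    by_cases hik : i = k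
    · rw [if_pos ⟨hik, by rw [hg1len]; exact hklt⟩, hg1k, List.length_set, hik]
    · rw [if_neg (by tauto), pv_getD_set]
      by_cases hik1 : i = k - 1
      · rw [if_pos ⟨hik1, by omega⟩, List.length_set, hik1]
      · rw [if_neg (by tauto)]
  · intro i j
    rw [pv_Lk_set2]
    by_cases h2 : i = k ∧ j = m
    · rw [if_pos ⟨h2.1, h2.2, by rw [hg1len]; exact hklt, by rw [hg1k]; exact hmrk⟩, if_neg (by omega), if_pos h2]
    · rw [if_neg (by tauto), pv_Lk_set2]
      by_cases h1 : i = k - 1 ∧ j = m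
      · rw [if_pos ⟨h1.1, h1.2, by omega, hmr1⟩, if_pos h1]
      · rw [if_neg (by tauto), if_neg (by tauto), if_neg (by tauto)]

lemma pv_inner (grid : List (List String)) (hpre : Pre_one_move grid)
    (k : Nat) (hk1 : 1 ≤ k) (hkn : k < grid.length)
    (g0 : List (List String)) (h0 : pvInv grid g0 k) :
    ∀ (cols : List String) (m : Nat) (g : List (List String)),
      cols = (grid.getD k []).drop m →
      g.length = grid.length →
      (∀ i, (g.getD i []).length = (grid.getD i []).length) →
      (∀ i j, pvLk g i j =
        if (i = k-1 ∨ i = k) ∧ j < m ∧ pvMovedUp grid j k = true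
        then (if i = k-1 then "O" else ".")
        else pvLk g0 i j) →
      ((PySem.List.enumerate cols (m:Int)).foldl (pvInnerStep (k:Int)) g).length = grid.length ∧
      (∀ i, (((PySem.List.enumerate cols (m:Int)).foldl (pvInnerStep (k:Int)) g).getD i []).length = (grid.getD i []).length) ∧
      (∀ i j, pvLk ((PySem.List.enumerate cols (m:Int)).foldl (pvInnerStep (k:Int)) g) i j =
        if (i = k-1 ∨ i = k) ∧ j < m + cols.length ∧ pvMovedUp grid j k = true
        then (if i = k-1 then "O" else ".")
        else pvLk g0 i j) := by
  intro cols
  induction cols with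
  | nil =>
    intro m g hdrop hlen hrows hpt
    simpa using ⟨hlen, hrows, hpt⟩
  | cons e rest ih =>
    intro m g hdrop hlen hrows hpt
    have hmlt : m < (grid.getD k []).length := by
      by_contra hc
      rw [List.drop_eq_nil_of_le (by omega)] at hdrop
      simp at hdrop
    have hdropm : (grid.getD k []).drop m
        = (grid.getD k [])[m]'hmlt :: (grid.getD k []).drop (m+1) :=
      (List.getElem_cons_drop hmlt).symm
    rw [hdropm] at hdrop
    have he : e = (grid.getD k [])[m]'hmlt := (List.cons.injEq _ _ _ _ ▸ hdrop).1
    have hrest : rest = (grid.getD k []).drop (m+1) := (List.cons.injEq _ _ _ _ ▸ hdrop).2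
    have hek : e = pvLk grid k m := by
      rw [he]; unfold pvLk; rw [List.getD_eq_getElem _ _ hmlt]
    have hek2 : (grid.getD k []).getD m "" = e := hek.symm
    -- one step of the fold
    rw [PySem.List.enumerate_cons, List.foldl_cons,
        show ((m:Int) + 1) = ((m+1 : Nat) : Int) by push_cast; ring]
    have hkc : ((k:Int) - 1) = ((k-1 : Nat) : Int) := by omega
    have hk' : k - 1 + 1 = k := by omega
    -- the hole A reads is row k-1 before this row's writes
    have hhole : pvLk g (k-1) m = if pvMovedUp grid m (k-1) = true then "." else pvLk grid (k-1) m := by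
      have h1 := hpt (k-1) m
      rw [if_neg (fun hcc => absurd hcc.2.1 (by omega))] at h1
      rw [h1, h0.2.2 (k-1) m]
      unfold pvVv
      rw [hk', if_neg (fun hcc => absurd hcc.2 (by omega))]
      by_cases hM' : pvMovedUp grid m (k-1) = true
      · rw [if_pos ⟨hM', by omega⟩, if_pos hM']
      · rw [if_neg (fun hcc => hM' hcc.1), if_neg hM']
    -- the loop guard is exactly "the run through (k, m) moves"
    have hcond : (e == "O" && ((g.getD (k-1) []).getD m "" == ".")) = pvMovedUp grid m k := by
      have hg : ((g.getD (k-1) []).getD m "") = pvLk g (k-1) m := rfl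
      rw [hg, hhole, show k = (k-1)+1 from hk'.symm, pv_movedUp_succ, hk', hek2]
      cases hM' : pvMovedUp grid m (k-1) <;> simp [pvLk]
    have hstepdef : pvInnerStep (k:Int) g ((m:Int), e) =
        (if (e == "O" && ((g.getD (k-1) []).getD m "" == ".")) = true then
          (g.set (k-1) ((g.getD (k-1) []).set m "O")).set k
            (((g.set (k-1) ((g.getD (k-1) []).set m "O")).getD k []).set m ".")
         else g) := by
      simp only [pvInnerStep, hkc, PySem.List.pyGetD_natCast, PySem.List.pySetD_natCast]
    by_cases hM : pvMovedUp grid m k = true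
    · -- the rock moves: the two writes of A
      have hklt : k < g.length := by rw [hlen]; exact hkn
      have hmr1 : m < (g.getD (k-1) []).length := by
        rw [hrows]
        calc m < (grid.getD k []).length := hmlt
          _ ≤ (grid.getD (k-1) []).length := by
              have := pv_pre_mono grid hpre (k-1); rwa [hk'] at this
      have hmrk : m < (g.getD k []).length := by rw [hrows]; exact hmlt
      have hstep : pvInnerStep (k:Int) g ((m:Int), e) =
          (g.set (k-1) ((g.getD (k-1) []).set m "O")).set k
            (((g.set (k-1) ((g.getD (k-1) []).set m "O")).getD k []).set m ".") := by
        rw [hstepdef, hcond, if_pos hM]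
      obtain ⟨hL2, hR2, hP2⟩ := pv_two_sets g k m hk1 hklt hmr1 hmrk
      have hpt3 : ∀ i j, pvLk ((g.set (k-1) ((g.getD (k-1) []).set m "O")).set k
            (((g.set (k-1) ((g.getD (k-1) []).set m "O")).getD k []).set m ".")) i j =
          if (i = k-1 ∨ i = k) ∧ j < m+1 ∧ pvMovedUp grid j k = true
          then (if i = k-1 then "O" else ".")
          else pvLk g0 i j := by
        intro i j
        rw [hP2 i j]
        by_cases h1 : i = k-1 ∧ j = m
        · have hc : (i = k-1 ∨ i = k) ∧ j < m+1 ∧ pvMovedUp grid j k = true :=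
            ⟨Or.inl h1.1, by omega, by rw [h1.2]; exact hM⟩
          rw [if_pos h1, if_pos hc, if_pos h1.1]
        · rw [if_neg h1]
          by_cases h2 : i = k ∧ j = m
          · have hc : (i = k-1 ∨ i = k) ∧ j < m+1 ∧ pvMovedUp grid j k = true :=
              ⟨Or.inr h2.1, by omega, by rw [h2.2]; exact hM⟩
            rw [if_pos h2, if_pos hc, if_neg (by omega)]
          · rw [if_neg h2, hpt i j]
            by_cases h3 : (i = k-1 ∨ i = k) ∧ j < m ∧ pvMovedUp grid j k = true
            · have hc : (i = k-1 ∨ i = k) ∧ j < m+1 ∧ pvMovedUp grid j k = true :=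
                ⟨h3.1, by omega, h3.2.2⟩
              rw [if_pos h3, if_pos hc]
            · rw [if_neg h3, if_neg ?_]
              rintro ⟨hi, hj, hMj⟩
              rcases (by omega : j < m ∨ j = m) with hj' | hj'
              · exact h3 ⟨hi, hj', hMj⟩
              · subst hj'
                rcases hi with hi | hi
                · exact h1 ⟨hi, rfl⟩
                · exact h2 ⟨hi, rfl⟩
      rw [hstep]
      have hres := ih (m+1) _ hrest (by rw [hL2, hlen]) (fun i => by rw [hR2 i, hrows i]) hpt3
      rw [show (m + 1) + rest.length = m + (e :: rest).length from by simp [Nat.add_assoc, Nat.add_comm 1]] at hres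
      exact hres
    · -- no move at this cell
      have hstep : pvInnerStep (k:Int) g ((m:Int), e) = g := by
        rw [hstepdef, hcond, if_neg hM]
      have hpt3 : ∀ i j, pvLk g i j =
          if (i = k-1 ∨ i = k) ∧ j < m+1 ∧ pvMovedUp grid j k = true
          then (if i = k-1 then "O" else ".")
          else pvLk g0 i j := by
        intro i j
        rw [hpt i j]
        by_cases h3 : (i = k-1 ∨ i = k) ∧ j < m ∧ pvMovedUp grid j k = true
        · have hc : (i = k-1 ∨ i = k) ∧ j < m+1 ∧ pvMovedUp grid j k = true :=
            ⟨h3.1, by omega, h3.2.2⟩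
          rw [if_pos h3, if_pos hc]
        · rw [if_neg h3, if_neg ?_]
          rintro ⟨hi, hj, hMj⟩
          rcases (by omega : j < m ∨ j = m) with hj' | hj'
          · exact h3 ⟨hi, hj', hMj⟩
          · exact hM (hj' ▸ hMj)
      rw [hstep]
      have hres := ih (m+1) g hrest hlen hrows hpt3
      rw [show (m + 1) + rest.length = m + (e :: rest).length from by simp [Nat.add_assoc, Nat.add_comm 1]] at hres
      exact hres

lemma pv_outer (grid : List (List String)) (hpre : Pre_one_move grid) :
    ∀ (rows : List (List String)) (k : Nat) (g : List (List String)),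
      rows = grid.drop k → pvInv grid g k →
      pvInv grid ((PySem.List.enumerate rows (k:Int)).foldl pvOuterStep g) (k + rows.length) := by
  intro rows
  induction rows with
  | nil =>
    intro k g hdrop hinv
    simpa using hinv
  | cons row rest ih =>
    intro k g hdrop hinv
    have hkn : k < grid.length := by
      by_contra hc
      rw [List.drop_eq_nil_of_le (by omega)] at hdrop
      simp at hdrop
    have hdropk : grid.drop k = grid[k]'hkn :: grid.drop (k+1) := (List.getElem_cons_drop hkn).symm
    rw [hdropk] at hdrop
    have hrow : row = grid[k]'hkn := (List.cons.injEq _ _ _ _ ▸ hdrop).1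
    have hrest : rest = grid.drop (k+1) := (List.cons.injEq _ _ _ _ ▸ hdrop).2
    rw [PySem.List.enumerate_cons, List.foldl_cons,
        show ((k:Int) + 1) = ((k+1 : Nat) : Int) by push_cast; ring]
    have hstep : pvInv grid (pvOuterStep g ((k:Int), row)) (k+1) := by
      by_cases hk0 : k = 0
      · subst hk0
        have h00 : pvOuterStep g (((0:Nat):Int), row) = g := by simp [pvOuterStep]
        rw [h00]
        obtain ⟨h1, h2, h3⟩ := hinv
        refine ⟨h1, h2, fun i j => ?_⟩
        rw [h3 i j]
        unfold pvVv
        rw [if_neg (fun hcc => absurd hcc.2 (by omega)),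
            if_neg (fun hcc => absurd hcc.2 (by omega)),
            if_neg (fun hcc => absurd hcc.2 (by omega)), if_neg ?_]
        rintro ⟨hMi, hilt⟩
        have hi0 : i = 0 := by omega
        subst hi0
        exact absurd hMi (by simp [pvMovedUp])
      · have hk1 : 1 ≤ k := by omega
        have hne : pvOuterStep g ((k:Int), row)
            = (PySem.List.enumerate row (((0:Nat)):Int)).foldl (pvInnerStep (k:Int)) g := by
          simp only [pvOuterStep]
          rw [if_neg (by simp; omega)]
          norm_num
        have hrowD : row = (grid.getD k []) := by
          rw [hrow, List.getD_eq_getElem _ _ hkn]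
        obtain ⟨hL, hR, hP⟩ := pv_inner grid hpre k hk1 hkn g hinv (grid.getD k []) 0 g
          (by simp) hinv.1 hinv.2.1
          (fun i j => by rw [if_neg (fun hcc => absurd hcc.2.1 (by omega))])
        rw [hne, hrowD]
        refine ⟨hL, hR, fun i j => ?_⟩
        rw [hP i j]
        by_cases hc : (i = k-1 ∨ i = k) ∧ pvMovedUp grid j k = true
        · have hjlt : j < 0 + (grid.getD k []).length := by
            have := pv_movedUp_lt grid k j hc.2
            omega
          rw [if_pos ⟨hc.1, hjlt, hc.2⟩]
          rcases hc.1 with hi | hi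
          · rw [if_pos hi]
            unfold pvVv
            rw [show i + 1 = k from by omega, if_pos ⟨hc.2, by omega⟩]
          · rw [if_neg (by omega : ¬ i = k - 1)]
            unfold pvVv
            have hMi : pvMovedUp grid j i = true := by rw [hi]; exact hc.2
            rw [if_neg (fun hcc => absurd hcc.2 (by omega)), if_pos ⟨hMi, by omega⟩]
        · rw [if_neg (fun hcc => hc ⟨hcc.1, hcc.2.2⟩), hinv.2.2 i j]
          unfold pvVv
          have e1 : (pvMovedUp grid j (i+1) = true ∧ i+1 < k) ↔ (pvMovedUp grid j (i+1) = true ∧ i+1 < k+1) := by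
            constructor
            · exact fun h => ⟨h.1, by omega⟩
            · rintro ⟨h1, h2⟩
              refine ⟨h1, ?_⟩
              rcases (by omega : i+1 < k ∨ i+1 = k) with hh | hh
              · exact hh
              · exact absurd (⟨Or.inl (by omega), hh ▸ h1⟩ : (i = k-1 ∨ i = k) ∧ pvMovedUp grid j k = true) hc
          have e2 : (pvMovedUp grid j i = true ∧ i < k) ↔ (pvMovedUp grid j i = true ∧ i < k+1) := by
            constructor
            · exact fun h => ⟨h.1, by omega⟩
            · rintro ⟨h1, h2⟩
              refine ⟨h1, ?_⟩
              rcases (by omega : i < k ∨ i = k) with hh | hh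
              · exact hh
              · exact absurd (⟨Or.inr hh, hh ▸ h1⟩ : (i = k-1 ∨ i = k) ∧ pvMovedUp grid j k = true) hc
          exact if_congr e1 rfl (if_congr e2 rfl rfl)
    have hres := ih (k+1) _ hrest hstep
    rw [show (k+1) + rest.length = k + (row :: rest).length from by simp [Nat.add_assoc, Nat.add_comm 1]] at hres
    exact hres

lemma pv_inv_final (grid : List (List String)) (hpre : Pre_one_move grid) :
    pvInv grid (one_move grid) grid.length := by
  have base : pvInv grid grid 0 :=
    ⟨rfl, fun i => rfl, fun i j => by
      unfold pvVv
      rw [if_neg (fun h => absurd h.2 (by omega)), if_neg (fun h => absurd h.2 (by omega))]⟩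
  have hres := pv_outer grid hpre grid 0 grid (by simp) base
  simp only [Nat.cast_zero, Nat.zero_add] at hres
  simpa [one_move] using hres

lemma pv_alt_val (grid : List (List String)) (i j : Nat)
    (hi : i < grid.length) (hj : j < (grid.getD i []).length) :
    pvLk (one_move_alt grid) i j = pvVv grid grid.length i j := by
  have hgi : grid.getD i [] = grid[i]'hi := List.getD_eq_getElem _ _ hi
  have hj' : j < (grid[i]'hi).length := by rw [← hgi]; exact hj
  have hiB : i < (one_move_alt grid).length := by simpa [one_move_alt] using hi
  have step1 : pvLk (one_move_alt grid) i j = ((one_move_alt grid)[i]'hiB).getD j "" := by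
    unfold pvLk
    rw [List.getD_eq_getElem _ _ hiB]
  have step2 : (one_move_alt grid)[i]'hiB = (grid[i]'hi).mapIdx (fun c elem =>
      if i + 1 < grid.length ∧ c < (grid.getD (i+1) []).length ∧ pvMovedUp grid c (i+1) = true
      then "O"
      else if elem == "O" && pvMovedUp grid c i then "."
      else elem) := by
    unfold one_move_alt
    rw [List.getElem_mapIdx]
  rw [step1, step2, List.getD_eq_getElem _ _ (by simpa using hj'), List.getElem_mapIdx]
  show (if i + 1 < grid.length ∧ j < (grid.getD (i+1) []).length ∧ pvMovedUp grid j (i+1) = true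
      then "O"
      else if ((grid[i]'hi)[j]'hj' == "O" && pvMovedUp grid j i) = true then "."
      else (grid[i]'hi)[j]'hj') = pvVv grid grid.length i j
  have helem : (grid[i]'hi)[j]'hj' = pvLk grid i j := by
    unfold pvLk
    rw [hgi, List.getD_eq_getElem _ _ hj']
  unfold pvVv
  rw [helem]
  refine if_congr ?_ rfl (if_congr ?_ rfl rfl)
  · constructor
    · rintro ⟨h1, _, h3⟩
      exact ⟨h3, h1⟩
    · rintro ⟨h1, h2⟩
      exact ⟨h2, pv_movedUp_lt grid (i+1) j h1, h1⟩
  · constructor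
    · rintro hb
      exact ⟨(Bool.and_eq_true_iff.mp hb).2, hi⟩
    · rintro ⟨h1, _⟩
      rw [Bool.and_eq_true_iff]
      refine ⟨?_, h1⟩
      cases i with
      | zero => exact absurd h1 (by simp [pvMovedUp])
      | succ r =>
        rw [show pvLk grid (r+1) j = (grid.getD (r+1) []).getD j "" from rfl,
            pv_movedUp_isO grid r j h1]
        rfl

theorem pv_main (grid : List (List String)) (hpre : Pre_one_move grid) :
    one_move grid = one_move_alt grid := by
  obtain ⟨hL, hR, hP⟩ := pv_inv_final grid hpre
  have haltlen : (one_move_alt grid).length = grid.length := by simp [one_move_alt]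
  apply List.ext_getElem (by rw [hL, haltlen])
  intro i hi1 hi2
  have hi : i < grid.length := by rw [← hL]; exact hi1
  have hgi : grid.getD i [] = grid[i]'hi := List.getD_eq_getElem _ _ hi
  have hrowA : (one_move grid)[i]'hi1 = (one_move grid).getD i [] :=
    (List.getD_eq_getElem _ _ hi1).symm
  have hrowB : (one_move_alt grid)[i]'hi2 = (one_move_alt grid).getD i [] :=
    (List.getD_eq_getElem _ _ hi2).symm
  rw [hrowA, hrowB]
  have hlenA : ((one_move grid).getD i []).length = (grid.getD i []).length := hR i
  have hlenB : ((one_move_alt grid).getD i []).length = (grid.getD i []).length := by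
    rw [← hrowB]
    unfold one_move_alt
    rw [List.getElem_mapIdx, List.length_mapIdx, hgi]
  apply List.ext_getElem (by rw [hlenA, hlenB])
  intro j hj1 hj2
  have hj : j < (grid.getD i []).length := by rw [← hlenA]; exact hj1
  have hA : ((one_move grid).getD i [])[j]'hj1 = pvLk (one_move grid) i j := by
    unfold pvLk
    rw [List.getD_eq_getElem _ _ hj1]
  have hB : ((one_move_alt grid).getD i [])[j]'hj2 = pvLk (one_move_alt grid) i j := by
    unfold pvLk
    rw [List.getD_eq_getElem _ _ hj2]
  rw [hA, hB, hP i j, pv_alt_val grid i j hi hj]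

-- ===== VERDICT (by name: the statement is the Claim_ definition above) =====
theorem one_move_spec : Claim_equal_one_move := by
  intro grid _ hpre
  unfold Spec_one_move
  exact pv_main grid hpre
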